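-- pv_equiv track=rewrite | github.com/fabio-noga/reference-identification | Utils.py | removeFakeNewLines
-- ===== SOURCE A (Python) =====
-- def removeFakeNewLines(phrases):
--     for i, phrase in enumerate(phrases):
--         charCounter=0
--         for char in phrase:
--             if char == '(':
--                 charCounter = charCounter + 1
--             if char == ')':
--                 if charCounter != 0:
--                     charCounter = charCounter - 1
--         if charCounter != 0 and i+1 < len(phrases):
--             return removeFakeNewLines(merge_items(phrases, i, i+1))
--     return phrases
--
-- def merge_items(array, index1, index2):
--     item1 = str(array[index1])
--     item2 = str(array[index2])
--
--     merged_item = str(item1 + item2)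
--     array[index1] = merged_item
--     array.pop(index2)
--
--     return array
-- ===== SOURCE B (Python) =====
-- def removeFakeNewLines(phrases):
--     # Single left-to-right pass: carry paren depth across phrases and merge
--     # into a buffer while depth stays nonzero. Note: unlike A, B does not
--     # mutate the input list; equivalence is about the return value.
--     out = []
--     buf = ''
--     depth = 0
--     for p in phrases:
--         for c in p:
--             if c == '(':
--                 depth += 1
--             elif c == ')' and depth != 0:
--                 depth -= 1
--         buf += p
--         if depth == 0:
--             out.append(buf)
--             buf = ''
--     if depth != 0:
--         out.append(buf)
--     return out
-- ===== Notes on version B (the rewrite author's own statement) =====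
-- stated objective: alternative
-- what changed: Replaced A's restart-from-the-top merge recursion (rescan all phrases and recurse after every single merge) with one left-to-right pass that carries the parenthesis depth across phrases and appends to a buffer while it is nonzero; B also does not mutate the input list.
import Mathlib
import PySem

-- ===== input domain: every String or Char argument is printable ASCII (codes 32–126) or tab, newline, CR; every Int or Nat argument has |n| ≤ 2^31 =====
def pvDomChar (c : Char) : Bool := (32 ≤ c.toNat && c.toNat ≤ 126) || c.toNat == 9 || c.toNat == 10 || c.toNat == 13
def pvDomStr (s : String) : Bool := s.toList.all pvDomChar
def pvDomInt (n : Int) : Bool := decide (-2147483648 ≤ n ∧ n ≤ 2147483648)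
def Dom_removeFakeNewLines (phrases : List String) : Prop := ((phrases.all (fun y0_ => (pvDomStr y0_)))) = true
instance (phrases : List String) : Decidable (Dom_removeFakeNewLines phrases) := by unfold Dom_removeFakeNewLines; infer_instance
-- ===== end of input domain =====

-- B is a single left-to-right pass carrying the paren depth across phrases, instead of
-- A's restart-from-the-top merge recursion; return value only: A mutates its input list, B does not.

-- ===== PORT A =====
-- inner character loop of A (two successive ifs, clamped decrement)
def pyCountStep (charCounter : Nat) (char : Char) : Nat :=
  let charCounter := if char = '(' then charCounter + 1 else charCounter
  if char = ')' then (if charCounter ≠ 0 then charCounter - 1 else charCounter) else charCounter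

def pyCount (phrase : String) : Nat := phrase.toList.foldl pyCountStep 0

-- merge_items: array[index1] = array[index1] + array[index2]; array.pop(index2)
-- (indices are always in range at the call site; getD's default is never used)
def mergeItems (array : List String) (index1 index2 : Nat) : List String :=
  let item1 := (array[index1]?).getD ""
  let item2 := (array[index2]?).getD ""
  let merged := item1 ++ item2
  (array.set index1 merged).eraseIdx index2

-- the enumerate loop: first index i with unbalanced count and i+1 < len(phrases)
-- (i+1 < len ⟺ the suffix after the current phrase is nonempty)
def scanUnbal (rest : List String) (i : Nat) : Option Nat :=
  match rest with
  | [] => none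
  | p :: rs => if pyCount p ≠ 0 ∧ rs ≠ [] then some i else scanUnbal rs (i + 1)

-- termination lemmas for the port's recursion (cited in decreasing_by)
theorem scanUnbal_bound : ∀ (rest : List String) (i j : Nat),
    scanUnbal rest i = some j → j + 2 ≤ i + rest.length := by
  intro rest
  induction rest with
  | nil => intro i j h; simp [scanUnbal] at h
  | cons p rs ih =>
    intro i j h
    simp only [scanUnbal] at h
    split_ifs at h with hc
    · cases h
      cases rs with
      | nil => exact absurd rfl hc.2
      | cons q rs' => simp only [List.length_cons]; omega
    · have := ih (i + 1) j h
      simp only [List.length_cons]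
      omega

theorem mergeItems_length_lt (l : List String) (i : Nat) (h : i + 1 < l.length) :
    (mergeItems l i (i + 1)).length < l.length := by
  simp [mergeItems, List.length_eraseIdx, List.length_set, h]
  omega

def removeFakeNewLines (phrases : List String) : List String :=
  match h : scanUnbal phrases 0 with
  | none => phrases
  | some i => removeFakeNewLines (mergeItems phrases i (i + 1))
termination_by phrases.length
decreasing_by
  have := scanUnbal_bound phrases 0 i h
  exact mergeItems_length_lt phrases i (by omega)

-- ===== PORT B =====
-- Source B's character step: elif chain, depth carried across phrases
def altStep (depth : Nat) (c : Char) : Nat :=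
  if c = '(' then depth + 1 else if c = ')' ∧ depth ≠ 0 then depth - 1 else depth

-- Source B's loop body over one phrase: state = (out, buf, depth)
def altBody (st : List String × String × Nat) (p : String) : List String × String × Nat :=
  let d := p.toList.foldl altStep st.2.2
  let buf := st.2.1 ++ p
  if d = 0 then (st.1 ++ [buf], "", 0) else (st.1, buf, d)

def removeFakeNewLines_alt (phrases : List String) : List String :=
  let st := phrases.foldl altBody ([], "", 0)
  if st.2.2 ≠ 0 then st.1 ++ [st.2.1] else st.1

-- ===== PRECONDITION & SPEC =====
def Spec_removeFakeNewLines (phrases : List String) (out : List String) : Prop := out = removeFakeNewLines_alt phrases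
instance (phrases : List String) (out : List String) : Decidable (Spec_removeFakeNewLines phrases out) := by unfold Spec_removeFakeNewLines; infer_instance

-- ===== CLAIM (what is proved, stated in full; the proofs are below) =====
def Claim_equal_removeFakeNewLines : Prop := ∀ (phrases : List String), Dom_removeFakeNewLines phrases → Spec_removeFakeNewLines phrases (removeFakeNewLines phrases)

-- ===== LEMMAS AND PROOFS =====

-- proof-side shorthand for B's final step
def altFinish (st : List String × String × Nat) : List String :=
  if st.2.2 ≠ 0 then st.1 ++ [st.2.1] else st.1

theorem alt_def (l : List String) :
    removeFakeNewLines_alt l = altFinish (l.foldl altBody ([], "", 0)) := rfl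

-- the two character steps agree
theorem step_eq : pyCountStep = altStep := by
  funext d c
  simp only [pyCountStep, altStep]
  split_ifs <;> simp_all

theorem count_eq (p : String) (d : Nat) :
    p.toList.foldl altStep d = p.toList.foldl pyCountStep d := by rw [step_eq]

-- output accumulated so far factors out of B's loop
theorem alt_out_factor : ∀ (l : List String) (out : List String) (buf : String) (d : Nat),
    altFinish (l.foldl altBody (out, buf, d)) = out ++ altFinish (l.foldl altBody ([], buf, d)) := by
  intro l
  induction l with
  | nil =>
    intro out buf d
    by_cases h : d = 0 <;> simp [altFinish, h]
  | cons p ps ih =>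
    intro out buf d
    rw [List.foldl_cons, List.foldl_cons]
    by_cases h : p.toList.foldl altStep d = 0
    · have e1 : altBody (out, buf, d) p = (out ++ [buf ++ p], "", 0) := by simp [altBody, h]
      have e2 : altBody ([], buf, d) p = ([buf ++ p], "", 0) := by simp [altBody, h]
      rw [e1, e2, ih (out ++ [buf ++ p]) "" 0, ih [buf ++ p] "" 0]
      simp
    · have e1 : altBody (out, buf, d) p = (out, buf ++ p, p.toList.foldl altStep d) := by
        simp [altBody, h]
      have e2 : altBody ([], buf, d) p = ([], buf ++ p, p.toList.foldl altStep d) := by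
        simp [altBody, h]
      rw [e1, e2]
      exact ih out (buf ++ p) _

-- B on a balanced head emits it and continues
theorem alt_cons_bal (p : String) (ps : List String) (h : pyCount p = 0) :
    removeFakeNewLines_alt (p :: ps) = p :: removeFakeNewLines_alt ps := by
  have hd : p.toList.foldl altStep 0 = 0 := by rw [count_eq]; exact h
  have e : altBody ([], "", 0) p = ([p], "", 0) := by simp [altBody, hd]
  rw [alt_def, alt_def, List.foldl_cons, e, alt_out_factor ps [p] "" 0]
  simp

-- B merges an unbalanced head into the next phrase
theorem alt_cons_unbal (p q : String) (rest : List String) (h : pyCount p ≠ 0) :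
    removeFakeNewLines_alt (p :: q :: rest) = removeFakeNewLines_alt ((p ++ q) :: rest) := by
  have hd : p.toList.foldl altStep 0 ≠ 0 := by rw [count_eq]; exact h
  have e0 : altBody ([], "", 0) p = ([], p, p.toList.foldl altStep 0) := by
    simp [altBody, hd]
  have e1 : altBody ([], p, p.toList.foldl altStep 0) q = altBody ([], "", 0) (p ++ q) := by
    simp [altBody, String.toList_append, List.foldl_append]
  rw [alt_def, alt_def, List.foldl_cons, List.foldl_cons, List.foldl_cons, e0, e1]

-- A's recursion, unfolded at a known scan value
theorem A_none {l : List String} (h : scanUnbal l 0 = none) : removeFakeNewLines l = l := by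
  rw [removeFakeNewLines.eq_def]
  split <;> simp_all

theorem A_some {l : List String} {i : Nat} (h : scanUnbal l 0 = some i) :
    removeFakeNewLines l = removeFakeNewLines (mergeItems l i (i + 1)) := by
  rw [removeFakeNewLines.eq_def]
  split <;> simp_all

theorem scan_shift : ∀ (rest : List String) (i : Nat),
    scanUnbal rest (i + 1) = Option.map Nat.succ (scanUnbal rest i) := by
  intro rest
  induction rest with
  | nil => intro i; simp [scanUnbal]
  | cons p rs ih =>
    intro i
    simp only [scanUnbal]
    split_ifs
    · rfl
    · exact ih (i + 1)

theorem merge_cons (p : String) (ps : List String) (j : Nat) :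
    mergeItems (p :: ps) (j + 1) (j + 2) = p :: mergeItems ps j (j + 1) := by
  simp [mergeItems]

-- A on a balanced head keeps it and recurses on the tail
theorem A_cons_bal : ∀ (n : Nat) (p : String) (ps : List String), ps.length ≤ n →
    pyCount p = 0 → removeFakeNewLines (p :: ps) = p :: removeFakeNewLines ps := by
  intro n
  induction n with
  | zero =>
    intro p ps hlen hbal
    have hnil : ps = [] := List.length_eq_zero_iff.mp (Nat.le_zero.mp hlen)
    subst hnil
    have h1 : scanUnbal [p] 0 = none := by simp [scanUnbal]
    have h2 : scanUnbal ([] : List String) 0 = none := by simp [scanUnbal]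
    rw [A_none h1, A_none h2]
  | succ n ihn =>
    intro p ps hlen hbal
    have hscan : scanUnbal (p :: ps) 0 = Option.map Nat.succ (scanUnbal ps 0) := by
      simp only [scanUnbal, hbal]
      simp [scan_shift]
    cases hs : scanUnbal ps 0 with
    | none =>
      rw [A_none (by rw [hscan, hs]; rfl), A_none hs]
    | some j =>
      have hA : removeFakeNewLines (p :: ps) =
          removeFakeNewLines (mergeItems (p :: ps) (j + 1) (j + 2)) := by
        exact A_some (by rw [hscan, hs]; rfl)
      have hb := scanUnbal_bound ps 0 j hs
      have hlt := mergeItems_length_lt ps j (by omega)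
      rw [hA, merge_cons, ihn p _ (by omega) hbal, A_some hs]

-- main equivalence, by strong induction on the list length
theorem main_eq : ∀ (n : Nat) (l : List String), l.length ≤ n →
    removeFakeNewLines l = removeFakeNewLines_alt l := by
  intro n
  induction n with
  | zero =>
    intro l hlen
    have : l = [] := List.length_eq_zero_iff.mp (Nat.le_zero.mp hlen)
    subst this
    rw [A_none (by simp [scanUnbal])]
    rfl
  | succ n ih =>
    intro l hlen
    cases l with
    | nil => rw [A_none (by simp [scanUnbal])]; rfl
    | cons p ps =>
      by_cases hb : pyCount p = 0
      · have hlen' : ps.length ≤ n := by simp at hlen; omega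
        rw [A_cons_bal ps.length p ps le_rfl hb, alt_cons_bal p ps hb, ih ps hlen']
      · cases ps with
        | nil =>
          have hd : p.toList.foldl altStep 0 ≠ 0 := by rw [count_eq]; exact hb
          rw [A_none (by simp [scanUnbal])]
          simp [removeFakeNewLines_alt, altBody, hd]
        | cons q rest =>
          have hscan : scanUnbal (p :: q :: rest) 0 = some 0 := by simp [scanUnbal, hb]
          have hm : mergeItems (p :: q :: rest) 0 1 = (p ++ q) :: rest := by
            simp [mergeItems]
          have hlen' : ((p ++ q) :: rest).length ≤ n := by simp at hlen ⊢; omega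
          rw [A_some hscan, hm, alt_cons_unbal p q rest hb, ih _ hlen']

-- ===== VERDICT (by name: the statement is the Claim_ definition above) =====
theorem removeFakeNewLines_spec : Claim_equal_removeFakeNewLines := by
  intro phrases _
  unfold Spec_removeFakeNewLines
  exact main_eq phrases.length phrases le_rfl
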